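-- pv_equiv track=rewrite | github.com/codingismycraft/pinta | server/disconnected_graph.py | _make_weakly_connected_graph
-- ===== SOURCE A (Python) =====
-- def _make_weakly_connected_graph(graph):
--     """Assures that the graph is weakly connected.
--
--     :param dict graph: The graph to assure weak connectivity.
--
--     :returns: The weakly connected graph.
--     :rtype: dict.
--     """
--     weak_graph = {}
--
--     for k, v in graph.items():
--         weak_graph[k] = set(v)
--
--     for node1, children in weak_graph.copy().items():
--         for node2 in children:
--             if node2 not in weak_graph:
--                 weak_graph[node2] = set()
--             if node1 not in weak_graph[node2]:
--                 weak_graph[node2].add(node1)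
--
--     return weak_graph
-- ===== SOURCE B (Python) =====
-- def _make_weakly_connected_graph(graph):
--     """Symmetric closure via a reverse-adjacency index built in one edge pass."""
--     rev = {}
--     for a, children in graph.items():
--         for b in children:
--             rev.setdefault(b, []).append(a)
--     result = {}
--     for k, v in graph.items():
--         s = set(v)
--         s.update(rev.get(k, ()))
--         result[k] = s
--     for b, parents in rev.items():
--         if b not in result:
--             result[b] = set(parents)
--     return result
-- ===== Notes on version B (the rewrite author's own statement) =====
-- stated objective: alternative
-- what changed: A copies the working dict and rescans each node's child set, guarding every reverse insertion with membership tests; B instead builds a reverse-adjacency index (target -> list of sources) in one edge pass and then assembles each node's set directly, appending the remaining new target keys from the index.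
import Mathlib
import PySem

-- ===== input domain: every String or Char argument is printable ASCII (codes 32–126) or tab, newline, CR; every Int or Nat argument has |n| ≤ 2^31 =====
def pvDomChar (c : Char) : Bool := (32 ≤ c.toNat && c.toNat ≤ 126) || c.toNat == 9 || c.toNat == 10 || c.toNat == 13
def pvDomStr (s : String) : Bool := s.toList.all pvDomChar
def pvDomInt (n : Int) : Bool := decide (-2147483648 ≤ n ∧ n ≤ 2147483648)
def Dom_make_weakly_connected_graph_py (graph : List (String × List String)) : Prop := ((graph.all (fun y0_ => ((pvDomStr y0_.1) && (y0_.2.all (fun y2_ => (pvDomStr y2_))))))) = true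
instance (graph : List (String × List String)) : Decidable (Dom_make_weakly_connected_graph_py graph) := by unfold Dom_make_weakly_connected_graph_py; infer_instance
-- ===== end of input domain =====

-- B replaces A's snapshot-and-rescan second pass by a reverse-adjacency index built in one
-- edge pass (objective: alternative decomposition, same cost); return values proved equal.

-- ===== PORT A =====
-- body of A's inner loop: `if node2 not in weak_graph: weak_graph[node2] = set()` then
-- `if node1 not in weak_graph[node2]: weak_graph[node2].add(node1)` (the index weak_graph[node2]
-- is ported with getD: the key is guaranteed present by the line before, so this is exact).
def pvInnerA (node1 : String) (d : PySem.Dict String (PySem.Set String)) (node2 : String) :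
    PySem.Dict String (PySem.Set String) :=
  let d1 := if d.contains node2 then d else d.insert node2 PySem.Set.empty
  if PySem.Set.contains (d1.getD node2 PySem.Set.empty) node1 then d1
  else d1.insert node2 (PySem.Set.add (d1.getD node2 PySem.Set.empty) node1)

-- `weak_graph.copy().items()` is the snapshot of the items after the first loop; iterating the
-- sets via their PySem.Set lists is order-exact only up to Python's set hash order, which the
-- value of the result does not depend on (dict and set outputs are compared as sets).
def make_weakly_connected_graph_py (graph : List (String × List String)) : List (String × List String) :=
  let wg : PySem.Dict String (PySem.Set String) :=
    graph.foldl (fun d p => d.insert p.1 (PySem.Set.ofList p.2)) PySem.Dict.empty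
  let wg2 := wg.items.foldl (fun d q => q.2.foldl (pvInnerA q.1) d) wg
  wg2.items

-- ===== PORT B =====
def make_weakly_connected_graph_py_alt (graph : List (String × List String)) : List (String × List String) :=
  -- rev.setdefault(b, []).append(a)  ==  rev[b] = rev.get(b, []) + [a]  ==  modify
  let rev : PySem.Dict String (List String) :=
    graph.foldl (fun d p => p.2.foldl (fun d b => d.modify b [] (fun l => l ++ [p.1])) d) PySem.Dict.empty
  let result : PySem.Dict String (PySem.Set String) :=
    graph.foldl (fun d p => d.insert p.1 (PySem.Set.update (PySem.Set.ofList p.2) (rev.getD p.1 []))) PySem.Dict.empty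
  let result2 := rev.items.foldl
    (fun d q => if d.contains q.1 then d else d.insert q.1 (PySem.Set.ofList q.2)) result
  result2.items

-- ===== PRECONDITION & SPEC =====
-- Pre_ only excludes association lists with a duplicated key: those do not represent any Python
-- dict (A's parameter is a dict, which cannot carry duplicate keys), so nothing A returns on is excluded.
def Pre_make_weakly_connected_graph_py (graph : List (String × List String)) : Prop :=
  (graph.map Prod.fst).Nodup
instance (graph : List (String × List String)) : Decidable (Pre_make_weakly_connected_graph_py graph) := by unfold Pre_make_weakly_connected_graph_py; infer_instance

def pvWitness_make_weakly_connected_graph_py : (List (String × List String)) :=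
  [("a", ["b", "c"]), ("b", [])]

def Spec_make_weakly_connected_graph_py (graph : List (String × List String)) (out : List (String × List String)) : Prop := out = make_weakly_connected_graph_py_alt graph
instance (graph : List (String × List String)) (out : List (String × List String)) : Decidable (Spec_make_weakly_connected_graph_py graph out) := by unfold Spec_make_weakly_connected_graph_py; infer_instance

-- ===== CLAIM (what is proved, stated in full; the proofs are below) =====
def Claim_equal_make_weakly_connected_graph_py : Prop := ∀ (graph : List (String × List String)), Dom_make_weakly_connected_graph_py graph → Pre_make_weakly_connected_graph_py graph → Spec_make_weakly_connected_graph_py graph (make_weakly_connected_graph_py graph)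

-- ===== LEMMAS AND PROOFS =====

-- the reversed edge list (target, source), raw rows resp. per-row-deduplicated rows
def pvEdges (g : List (String × List String)) : List (String × String) :=
  g.flatMap (fun p => p.2.map (fun b => (b, p.1)))
def pvEdgesA (g : List (String × List String)) : List (String × String) :=
  g.flatMap (fun p => (PySem.Set.ofList p.2).map (fun b => (b, p.1)))

-- sources of the edges targeting k, in list order
def pvPar (F : List (String × String)) (k : String) : List String :=
  (F.filter (fun q => q.1 == k)).map Prod.snd

-- the edge-driven scatter loop both second passes reduce to
def pvScatter (d : PySem.Dict String (PySem.Set String)) (F : List (String × String)) :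
    PySem.Dict String (PySem.Set String) :=
  F.foldl (fun d q => d.modify q.1 PySem.Set.empty (fun s => PySem.Set.add s q.2)) d

lemma pv_insert_getD_self (d : PySem.Dict String (PySem.Set String)) (k : String)
    (d0 : PySem.Set String) (hnd : d.keys.Nodup) (h : d.contains k = true) :
    d.insert k (d.getD k d0) = d := by
  apply PySem.Dict.ext
  rw [PySem.Dict.items_insert_of_contains d _ h]
  conv_rhs => rw [← List.map_id d.items]
  apply List.map_congr_left
  intro p hp
  by_cases hpk : (p.1 == k) = true
  · have hk : p.1 = k := by simpa using hpk
    have : d.getD p.1 d0 = p.2 := PySem.Dict.getD_of_mem_items d (by simpa using hp) hnd d0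
    simp [← hk, this]
  · simp [hpk]

lemma pv_innerA_eq_modify (a b : String) (d : PySem.Dict String (PySem.Set String))
    (hnd : d.keys.Nodup) :
    pvInnerA a d b = d.modify b PySem.Set.empty (fun s => PySem.Set.add s a) := by
  simp only [pvInnerA, PySem.Dict.modify]
  by_cases h : d.contains b = true
  · simp only [h, if_true]
    by_cases hc : PySem.Set.contains (d.getD b PySem.Set.empty) a = true
    · have hmem : a ∈ d.getD b PySem.Set.empty := (PySem.Set.contains_iff _ _).mp hc
      rw [if_pos hc, PySem.Set.add_of_mem hmem, pv_insert_getD_self d b _ hnd h]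
    · rw [if_neg hc]
  · have h' : d.contains b = false := by simpa using h
    simp only [h', if_false, Bool.false_eq_true]
    rw [PySem.Dict.getD_insert_self, PySem.Dict.getD_of_not_contains d _ h']
    have : PySem.Set.contains (PySem.Set.empty : PySem.Set String) a = false := rfl
    rw [this]
    simp only [Bool.false_eq_true, if_false]
    rw [PySem.Dict.insert_insert_self]

lemma pvScatter_keys (F : List (String × String)) (d : PySem.Dict String (PySem.Set String)) :
    (pvScatter d F).keys = PySem.Set.update d.keys (F.map Prod.fst) :=
  PySem.Dict.keys_foldl_modify_key F Prod.fst PySem.Set.empty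
    (fun _ q => fun s => PySem.Set.add s q.2) d

lemma pvScatter_nodup (F : List (String × String)) (d : PySem.Dict String (PySem.Set String))
    (hnd : d.keys.Nodup) : (pvScatter d F).keys.Nodup :=
  PySem.Dict.nodup_keys_foldl_modify_key F Prod.fst PySem.Set.empty
    (fun _ q => fun s => PySem.Set.add s q.2) d hnd

lemma pvScatter_getD (F : List (String × String)) :
    ∀ (d : PySem.Dict String (PySem.Set String)) (k : String),
    (pvScatter d F).getD k PySem.Set.empty
      = PySem.Set.update (d.getD k PySem.Set.empty) (pvPar F k) := by
  induction F with
  | nil => intro d k; simp [pvScatter, pvPar, PySem.Set.update_nil]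
  | cons q F ih =>
    intro d k
    have hstep : pvScatter d (q :: F)
        = pvScatter (d.modify q.1 PySem.Set.empty (fun s => PySem.Set.add s q.2)) F := rfl
    rw [hstep, ih, PySem.Dict.getD_modify]
    by_cases h : k = q.1
    · subst h
      simp [pvPar, PySem.Set.update_cons]
    · have h' : (q.1 == k) = false := by simpa using Ne.symm h
      simp [pvPar, h', if_neg h]

lemma pvScatter_items (F : List (String × String)) (d : PySem.Dict String (PySem.Set String))
    (hnd : d.keys.Nodup) :
    (pvScatter d F).items
      = d.items.map (fun p => (p.1, PySem.Set.update p.2 (pvPar F p.1)))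
        ++ ((PySem.Set.ofList (F.map Prod.fst)).filter (fun b => !(d.contains b))).map
            (fun b => (b, PySem.Set.ofList (pvPar F b))) := by
  have hnd' := pvScatter_nodup F d hnd
  rw [PySem.Dict.items_eq_map_keys _ hnd' PySem.Set.empty, pvScatter_keys,
      PySem.Set.update_eq_append_filter, List.map_append]
  have hpred : (fun y => !(PySem.Set.contains d.keys y)) = (fun b => !(d.contains b)) := by
    funext y
    have : PySem.Set.contains d.keys y = d.contains y := by
      rw [Bool.eq_iff_iff, PySem.Set.contains_iff, PySem.Dict.contains_iff_mem_keys]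
    rw [this]
  rw [hpred]
  congr 1
  · rw [PySem.Dict.items_eq_map_keys d hnd PySem.Set.empty, List.map_map]
    apply List.map_congr_left
    intro k hk
    simp only [Function.comp]
    rw [pvScatter_getD]
  · apply List.map_congr_left
    intro b hb
    have hnc : d.contains b = false := by
      have := List.of_mem_filter hb
      simpa using this
    rw [pvScatter_getD, PySem.Dict.getD_of_not_contains d _ hnc]
    have : PySem.Set.update (PySem.Set.empty : PySem.Set String) (pvPar F b)
        = PySem.Set.ofList (pvPar F b) := PySem.Set.update_nil_left _
    rw [this]

lemma pv_foldA_row (bs : List String) :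
    ∀ (a : String) (d : PySem.Dict String (PySem.Set String)), d.keys.Nodup →
    bs.foldl (pvInnerA a) d = pvScatter d (bs.map (fun b => (b, a))) := by
  induction bs with
  | nil => intro a d _; rfl
  | cons b bs ih =>
    intro a d hnd
    have h1 : pvInnerA a d b = d.modify b PySem.Set.empty (fun s => PySem.Set.add s a) :=
      pv_innerA_eq_modify a b d hnd
    have hnd1 : (d.modify b PySem.Set.empty (fun s => PySem.Set.add s a)).keys.Nodup := by
      have := pvScatter_nodup [(b, a)] d hnd
      simpa [pvScatter] using this
    calc (b :: bs).foldl (pvInnerA a) d = bs.foldl (pvInnerA a) (pvInnerA a d b) := rfl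
      _ = bs.foldl (pvInnerA a) (d.modify b PySem.Set.empty (fun s => PySem.Set.add s a)) := by rw [h1]
      _ = pvScatter (d.modify b PySem.Set.empty (fun s => PySem.Set.add s a))
            (bs.map (fun b => (b, a))) := ih a _ hnd1
      _ = pvScatter d ((b :: bs).map (fun b => (b, a))) := rfl

lemma pv_foldA (L : List (String × PySem.Set String)) :
    ∀ (d : PySem.Dict String (PySem.Set String)), d.keys.Nodup →
    L.foldl (fun d q => q.2.foldl (pvInnerA q.1) d) d
      = pvScatter d (L.flatMap (fun q => q.2.map (fun b => (b, q.1)))) := by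
  induction L with
  | nil => intro d _; rfl
  | cons q L ih =>
    intro d hnd
    have h1 := pv_foldA_row q.2 q.1 d hnd
    have hnd1 : (pvScatter d (q.2.map (fun b => (b, q.1)))).keys.Nodup :=
      pvScatter_nodup _ d hnd
    calc (q :: L).foldl (fun d q => q.2.foldl (pvInnerA q.1) d) d
        = L.foldl (fun d q => q.2.foldl (pvInnerA q.1) d) (q.2.foldl (pvInnerA q.1) d) := rfl
      _ = L.foldl (fun d q => q.2.foldl (pvInnerA q.1) d)
            (pvScatter d (q.2.map (fun b => (b, q.1)))) := by rw [h1]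
      _ = pvScatter (pvScatter d (q.2.map (fun b => (b, q.1))))
            (L.flatMap (fun q => q.2.map (fun b => (b, q.1)))) := ih _ hnd1
      _ = pvScatter d ((q :: L).flatMap (fun q => q.2.map (fun b => (b, q.1)))) := by
            simp [pvScatter, List.flatMap_cons, List.foldl_append]

lemma pv_revB (G : List (String × List String)) :
    ∀ (d : PySem.Dict String (List String)),
    G.foldl (fun d p => p.2.foldl (fun d b => d.modify b [] (fun l => l ++ [p.1])) d) d
      = (pvEdges G).foldl (fun d q => d.modify q.1 [] (fun l => l ++ [q.2])) d := by
  induction G with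
  | nil => intro d; rfl
  | cons p G ih =>
    intro d
    simp only [List.foldl_cons, pvEdges, List.flatMap_cons, List.foldl_append, List.foldl_map]
    rw [← pvEdges, ih]

lemma pv_phase3 (L : List (String × List String)) :
    ∀ (d : PySem.Dict String (PySem.Set String)), (L.map Prod.fst).Nodup →
    (L.foldl (fun d q => if d.contains q.1 then d else d.insert q.1 (PySem.Set.ofList q.2)) d).items
      = d.items ++ (L.filter (fun q => !(d.contains q.1))).map
          (fun q => (q.1, PySem.Set.ofList q.2)) := by
  induction L with
  | nil => intro d _; simp
  | cons q L ih =>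
    intro d hnd
    have hnd' : (q.1 :: L.map Prod.fst).Nodup := by simpa using hnd
    have hndt : (L.map Prod.fst).Nodup := (List.nodup_cons.mp hnd').2
    have hq : q.1 ∉ L.map Prod.fst := (List.nodup_cons.mp hnd').1
    by_cases h : d.contains q.1 = true
    · simp only [List.foldl_cons, h, if_true, List.filter_cons, Bool.not_true,
        Bool.false_eq_true, if_false]
      exact ih d hndt
    · have h' : d.contains q.1 = false := by simpa using h
      simp only [List.foldl_cons, h', Bool.false_eq_true, if_false, List.filter_cons,
        Bool.not_false, if_true]
      rw [ih _ hndt, PySem.Dict.items_insert_of_not_contains d _ h']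
      have hfil : L.filter (fun x => !((d.insert q.1 (PySem.Set.ofList q.2)).contains x.1))
          = L.filter (fun x => !(d.contains x.1)) := by
        apply List.filter_congr
        intro x hx
        have hne : (x.1 == q.1) = false := by
          have : x.1 ≠ q.1 := fun hEq => hq (hEq ▸ List.mem_map_of_mem hx)
          simpa using this
        rw [PySem.Dict.contains_insert, hne, Bool.false_or]
      rw [hfil, List.map_cons, List.append_assoc, List.singleton_append]

lemma pv_ofList_allconst (l : List String) (a : String) (h : ∀ x ∈ l, x = a) :
    PySem.Set.ofList l = if l = [] then [] else [a] := by
  cases l with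
  | nil => simp [PySem.Set.ofList_nil]
  | cons x t =>
    have hx : x = a := h x (List.mem_cons_self ..)
    have hdis : PySem.Set.discard (PySem.Set.ofList t) x = [] := by
      apply List.eq_nil_iff_forall_not_mem.mpr
      intro y hy
      have := (PySem.Set.mem_discard ..).mp hy
      exact this.2 (by
        have hyt : y ∈ t := (PySem.Set.mem_ofList ..).mp this.1
        rw [h y (List.mem_cons_of_mem _ hyt), hx])
    rw [PySem.Set.ofList_cons, hdis, hx]
    simp

lemma pv_row_eq (v : List String) (k a : String) :
    PySem.Set.ofList (((PySem.Set.ofList v).filter (fun b => b == k)).map (fun _ => a))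
      = PySem.Set.ofList ((v.filter (fun b => b == k)).map (fun _ => a)) := by
  have hconst : ∀ (l : List String), (∀ x ∈ l.map (fun _ => a), x = a) := by
    intro l x hx
    rcases List.mem_map.mp hx with ⟨b, -, rfl⟩
    rfl
  rw [pv_ofList_allconst _ a (hconst _), pv_ofList_allconst _ a (hconst _)]
  by_cases hk : k ∈ v
  · rw [if_neg, if_neg]
    · intro hnil
      have := List.map_eq_nil_iff.mp hnil
      exact (List.filter_eq_nil_iff.mp this k hk) (by simp)
    · intro hnil
      have := List.map_eq_nil_iff.mp hnil
      exact (List.filter_eq_nil_iff.mp this k ((PySem.Set.mem_ofList ..).mpr hk)) (by simp)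
  · rw [if_pos, if_pos]
    · rw [List.map_eq_nil_iff]
      apply List.filter_eq_nil_iff.mpr
      intro x hxv hbx
      have hxk : x = k := by simpa using hbx
      exact hk (hxk ▸ hxv)
    · rw [List.map_eq_nil_iff]
      apply List.filter_eq_nil_iff.mpr
      intro x hxv hbx
      have hxv' : x ∈ v := (PySem.Set.mem_ofList ..).mp hxv
      have hxk : x = k := by simpa using hbx
      exact hk (hxk ▸ hxv')

lemma pv_par_edges (g : List (String × List String)) (k : String) :
    pvPar (pvEdges g) k
      = g.flatMap (fun p => (p.2.filter (fun b => b == k)).map (fun _ => p.1)) := by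
  simp only [pvPar, pvEdges, List.filter_flatMap, List.map_flatMap]
  apply List.flatMap_congr
  intro p _
  rw [List.filter_map, List.map_map]
  rfl

lemma pv_par_edgesA (g : List (String × List String)) (k : String) :
    pvPar (pvEdgesA g) k
      = g.flatMap (fun p => ((PySem.Set.ofList p.2).filter (fun b => b == k)).map (fun _ => p.1)) := by
  simp only [pvPar, pvEdgesA, List.filter_flatMap, List.map_flatMap]
  apply List.flatMap_congr
  intro p _
  rw [List.filter_map, List.map_map]
  rfl

lemma pv_update_row (s : PySem.Set String) (xs ys : List String)
    (h : PySem.Set.ofList xs = PySem.Set.ofList ys) :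
    PySem.Set.update s xs = PySem.Set.update s ys := by
  rw [PySem.Set.update_eq_append_filter, PySem.Set.update_eq_append_filter, h]

lemma pv_update_par (g : List (String × List String)) (k : String) :
    ∀ s : PySem.Set String,
    PySem.Set.update s (pvPar (pvEdgesA g) k) = PySem.Set.update s (pvPar (pvEdges g) k) := by
  rw [pv_par_edgesA, pv_par_edges]
  induction g with
  | nil => intro s; rfl
  | cons p g ih =>
    intro s
    rw [List.flatMap_cons, List.flatMap_cons, PySem.Set.update_append, PySem.Set.update_append,
        pv_update_row s _ _ (pv_row_eq p.2 k p.1)]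
    exact ih _

lemma pv_update_flat (g : List (String × List String)) :
    ∀ s : PySem.Set String,
    PySem.Set.update s (g.flatMap (fun p => ((PySem.Set.ofList p.2 : List String)))) =
      PySem.Set.update s (g.flatMap (fun p => p.2)) := by
  induction g with
  | nil => intro s; rfl
  | cons p g ih =>
    intro s
    rw [List.flatMap_cons, List.flatMap_cons, PySem.Set.update_append, PySem.Set.update_append,
        pv_update_row s _ _ (PySem.Set.ofList_ofList p.2)]
    exact ih _

lemma pv_keysets_eq (g : List (String × List String)) :
    PySem.Set.ofList ((pvEdgesA g).map Prod.fst) = PySem.Set.ofList ((pvEdges g).map Prod.fst) := by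
  have hA : (pvEdgesA g).map Prod.fst = g.flatMap (fun p => ((PySem.Set.ofList p.2 : List String))) := by
    simp only [pvEdgesA, List.map_flatMap, List.map_map]
    apply List.flatMap_congr
    intro p _
    exact List.map_id _
  have hB : (pvEdges g).map Prod.fst = g.flatMap (fun p => p.2) := by
    simp only [pvEdges, List.map_flatMap, List.map_map]
    apply List.flatMap_congr
    intro p _
    exact List.map_id _
  rw [hA, hB, ← PySem.Set.update_nil_left, ← PySem.Set.update_nil_left]
  exact pv_update_flat g []

lemma pv_A_items (graph : List (String × List String))
    (hpre : (graph.map Prod.fst).Nodup) :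
    make_weakly_connected_graph_py graph
      = graph.map (fun p => (p.1, PySem.Set.update (PySem.Set.ofList p.2) (pvPar (pvEdgesA graph) p.1)))
        ++ ((PySem.Set.ofList ((pvEdgesA graph).map Prod.fst)).filter
              (fun b => !(decide (b ∈ graph.map Prod.fst)))).map
            (fun b => (b, PySem.Set.ofList (pvPar (pvEdgesA graph) b))) := by
  simp only [make_weakly_connected_graph_py]
  have hwitems : (graph.foldl (fun d p => d.insert p.1 (PySem.Set.ofList p.2)) PySem.Dict.empty).items
      = graph.map (fun p => (p.1, PySem.Set.ofList p.2)) := by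
    have := PySem.Dict.items_foldl_insert_fresh graph Prod.fst (fun p => PySem.Set.ofList p.2)
      PySem.Dict.empty (fun a _ => PySem.Dict.contains_empty a.1) hpre
    simpa using this
  have hwkeys : (graph.foldl (fun d p => d.insert p.1 (PySem.Set.ofList p.2)) PySem.Dict.empty).keys
      = graph.map Prod.fst := by
    show (graph.foldl (fun d p => d.insert p.1 (PySem.Set.ofList p.2)) PySem.Dict.empty).items.map
      (fun p => p.1) = graph.map Prod.fst
    rw [hwitems, List.map_map]
    rfl
  have hnd : (graph.foldl (fun d p => d.insert p.1 (PySem.Set.ofList p.2)) PySem.Dict.empty).keys.Nodup := by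
    rw [hwkeys]; exact hpre
  rw [pv_foldA _ _ hnd]
  have hflat : ((graph.foldl (fun d p => d.insert p.1 (PySem.Set.ofList p.2)) PySem.Dict.empty).items).flatMap
      (fun q => q.2.map (fun b => (b, q.1))) = pvEdgesA graph := by
    rw [hwitems, pvEdgesA, List.flatMap_map]
  rw [hflat, pvScatter_items _ _ hnd, hwitems, List.map_map]
  have hpredA : (fun b => !((graph.foldl (fun d p => d.insert p.1 (PySem.Set.ofList p.2)) PySem.Dict.empty).contains b))
      = (fun b => !(decide (b ∈ graph.map Prod.fst))) := by
    funext b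
    rw [PySem.Dict.contains_eq_decide_mem_keys, hwkeys]
  rw [hpredA]
  rfl

lemma pv_B_items (graph : List (String × List String))
    (hpre : (graph.map Prod.fst).Nodup) :
    make_weakly_connected_graph_py_alt graph
      = graph.map (fun p => (p.1, PySem.Set.update (PySem.Set.ofList p.2) (pvPar (pvEdges graph) p.1)))
        ++ ((PySem.Set.ofList ((pvEdges graph).map Prod.fst)).filter
              (fun b => !(decide (b ∈ graph.map Prod.fst)))).map
            (fun b => (b, PySem.Set.ofList (pvPar (pvEdges graph) b))) := by
  simp only [make_weakly_connected_graph_py_alt]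
  have hrev : (graph.foldl (fun d p => p.2.foldl (fun d b => d.modify b [] (fun l => l ++ [p.1])) d) PySem.Dict.empty)
      = (pvEdges graph).foldl (fun d q => d.modify q.1 [] (fun l => l ++ [q.2])) PySem.Dict.empty :=
    pv_revB graph PySem.Dict.empty
  set rev := (graph.foldl (fun d p => p.2.foldl (fun d b => d.modify b [] (fun l => l ++ [p.1])) d) PySem.Dict.empty) with hrevdef
  have hgetD : ∀ kk, rev.getD kk [] = pvPar (pvEdges graph) kk := by
    intro kk
    rw [hrev, PySem.Dict.getD_foldl_modify_append, PySem.Dict.getD_empty]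
    rfl
  have hkeysrev : rev.keys = PySem.Set.ofList ((pvEdges graph).map Prod.fst) := by
    rw [hrev, PySem.Dict.keys_foldl_modify_key, PySem.Dict.keys_empty, PySem.Set.update_nil_left]
  have hndrev : rev.keys.Nodup := by
    rw [hkeysrev]; exact PySem.Set.nodup_ofList _
  have hitemsrev : rev.items = rev.keys.map (fun b => (b, rev.getD b [])) :=
    PySem.Dict.items_eq_map_keys rev hndrev []
  have hres1 : (graph.foldl (fun d p => d.insert p.1 (PySem.Set.update (PySem.Set.ofList p.2) (rev.getD p.1 []))) PySem.Dict.empty).items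
      = graph.map (fun p => (p.1, PySem.Set.update (PySem.Set.ofList p.2) (rev.getD p.1 []))) := by
    have := PySem.Dict.items_foldl_insert_fresh graph Prod.fst
      (fun p => PySem.Set.update (PySem.Set.ofList p.2) (rev.getD p.1 []))
      PySem.Dict.empty (fun a _ => PySem.Dict.contains_empty a.1) hpre
    simpa using this
  have hres1keys : (graph.foldl (fun d p => d.insert p.1 (PySem.Set.update (PySem.Set.ofList p.2) (rev.getD p.1 []))) PySem.Dict.empty).keys
      = graph.map Prod.fst := by
    show (graph.foldl (fun d p => d.insert p.1 (PySem.Set.update (PySem.Set.ofList p.2) (rev.getD p.1 []))) PySem.Dict.empty).items.map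
      (fun p => p.1) = graph.map Prod.fst
    rw [hres1, List.map_map]
    rfl
  have hmapnodup : (rev.items.map Prod.fst).Nodup := hndrev
  rw [pv_phase3 rev.items _ hmapnodup, hres1, hitemsrev, List.filter_map, List.map_map]
  congr 1
  · apply List.map_congr_left
    intro p _
    rw [hgetD]
  · rw [hkeysrev]
    have hpredB : ((fun q => !((graph.foldl (fun d p => d.insert p.1 (PySem.Set.update (PySem.Set.ofList p.2) (rev.getD p.1 []))) PySem.Dict.empty).contains q.1)) ∘ (fun b => (b, rev.getD b [])))
        = (fun b => !(decide (b ∈ graph.map Prod.fst))) := by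
      funext b
      simp only [Function.comp_apply]
      rw [PySem.Dict.contains_eq_decide_mem_keys, hres1keys]
    rw [hpredB]
    apply List.map_congr_left
    intro b _
    simp only [Function.comp_apply]
    rw [hgetD]

-- ===== VERDICT (by name: the statement is the Claim_ definition above) =====
theorem make_weakly_connected_graph_py_spec : Claim_equal_make_weakly_connected_graph_py := by
  intro graph _ hpre
  show make_weakly_connected_graph_py graph = make_weakly_connected_graph_py_alt graph
  rw [pv_A_items graph hpre, pv_B_items graph hpre]
  congr 1
  · apply List.map_congr_left
    intro p _
    rw [pv_update_par]
  · rw [pv_keysets_eq]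
    apply List.map_congr_left
    intro b _
    rw [← PySem.Set.update_nil_left (pvPar (pvEdgesA graph) b),
        ← PySem.Set.update_nil_left (pvPar (pvEdges graph) b), pv_update_par]
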